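-- pv_equiv track=rewrite | github.com/eliottcassidy2000/math | 04-computation/overlap_weight_analysis.py | analyze_overlap_by_vertex_pair
-- ===== SOURCE A (Python) =====
-- def analyze_overlap_by_vertex_pair(cycles, p):
--     """For each pair of Z_p vertices (u,v), count how many cycles contain both.
--
--     This gives a "co-occurrence matrix" on Z_p. For circulant tournaments,
--     co-occurrence(u,v) depends only on (v-u) mod p.
--     """
--     co_occur = [[0]*p for _ in range(p)]
--     for fs, k in cycles:
--         verts = list(fs)
--         for i in range(len(verts)):
--             for j in range(i+1, len(verts)):
--                 co_occur[verts[i]][verts[j]] += 1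
--                 co_occur[verts[j]][verts[i]] += 1
--
--     # For circulant: co-occurrence should depend only on gap
--     gap_co = [0] * p
--     for d in range(1, p):
--         gap_co[d] = co_occur[0][d]  # by circulant symmetry
--
--     return co_occur, gap_co
-- ===== SOURCE B (Python) =====
-- def analyze_overlap_by_vertex_pair(cycles, p):
--     """For each pair of Z_p vertices (u,v), count how many cycles contain both.
--
--     Pair-centric formulation: tally each cycle's vertices by residue mod p once,
--     then fill each matrix entry from a closed-form product of those tallies;
--     entries whose row or column residue occurs in no cycle are 0 directly.
--     """
--     if p <= 0:
--         return [], []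
--
--     counts = []
--     touched = set()
--     for fs, k in cycles:
--         c = {}
--         for v in fs:
--             r = v % p
--             c[r] = c.get(r, 0) + 1
--         counts.append(c)
--         touched.update(c)
--
--     def entry(u, v):
--         if u != v:
--             return sum(c.get(u, 0) * c.get(v, 0) for c in counts)
--         return sum(c.get(u, 0) * (c.get(u, 0) - 1) for c in counts)
--
--     co_occur = [[entry(u, v) if v in touched else 0 for v in range(p)]
--                 if u in touched else [0] * p
--                 for u in range(p)]
--
--     gap_co = [co_occur[0][d] if d else 0 for d in range(p)]
--     return co_occur, gap_co
-- ===== Notes on version B (the rewrite author's own statement) =====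
-- stated objective: alternative
-- what changed: B replaces A's per-cycle double loop over internal vertex pairs (two matrix increments per pair) by a per-cycle residue tally (dict) and a closed-form product of tallies for every matrix entry (count_u*count_v off-diagonal, count_u*(count_u-1) on the diagonal), filling the matrix per entry instead of per increment.
import Mathlib
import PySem

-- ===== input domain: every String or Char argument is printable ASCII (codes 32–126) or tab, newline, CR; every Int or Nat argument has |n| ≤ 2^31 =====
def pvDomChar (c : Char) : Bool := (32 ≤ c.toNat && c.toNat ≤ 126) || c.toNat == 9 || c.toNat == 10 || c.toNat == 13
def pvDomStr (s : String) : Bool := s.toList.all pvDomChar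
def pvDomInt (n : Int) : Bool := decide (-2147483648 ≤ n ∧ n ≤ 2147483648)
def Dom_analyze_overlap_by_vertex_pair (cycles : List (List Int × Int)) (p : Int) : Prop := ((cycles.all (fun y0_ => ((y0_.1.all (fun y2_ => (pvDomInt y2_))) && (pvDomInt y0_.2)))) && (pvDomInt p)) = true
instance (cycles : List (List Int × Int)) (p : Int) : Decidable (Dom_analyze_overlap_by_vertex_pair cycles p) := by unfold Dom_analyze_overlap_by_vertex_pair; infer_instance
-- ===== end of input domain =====

-- B replaces A's per-cycle double loop over internal vertex pairs by a per-cycle residue tally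
-- (a Counter) plus a closed-form product formula per matrix entry (alternative decomposition).

-- ===== PORT A =====
-- co_occur[x][y] += 1 — Python list indexing (negative wraps); the total pyGetD/pySetD forms
-- are exact here because Pre_ excludes exactly the IndexError inputs.
def pvIncr (m : List (List Int)) (x y : Int) : List (List Int) :=
  PySem.List.pySetD m x
    (PySem.List.pySetD (PySem.List.pyGetD m x []) y
      (PySem.List.pyGetD (PySem.List.pyGetD m x []) y 0 + 1))

def analyze_overlap_by_vertex_pair (cycles : List (List Int × Int)) (p : Int) : List (List Int) × List Int :=
  -- co_occur = [[0]*p for _ in range(p)]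
  let co0 : List (List Int) := (PySem.List.pyRange 0 p).map (fun _ => List.replicate p.toNat (0 : Int))
  -- for fs, k in cycles: verts = list(fs); for i in range(len(verts)): for j in range(i+1, len(verts)): two increments
  let co := cycles.foldl (fun co c =>
    let verts := c.1
    (PySem.List.pyRange 0 (PySem.List.len verts)).foldl (fun co i =>
      (PySem.List.pyRange (i + 1) (PySem.List.len verts)).foldl (fun co j =>
        pvIncr (pvIncr co (PySem.List.pyGetD verts i 0) (PySem.List.pyGetD verts j 0))
          (PySem.List.pyGetD verts j 0) (PySem.List.pyGetD verts i 0)) co) co) co0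
  -- gap_co = [0]*p; for d in range(1, p): gap_co[d] = co_occur[0][d]  (always in range here)
  let gap := (PySem.List.pyRange 1 p).foldl (fun g d =>
    PySem.List.pySetD g d (PySem.List.pyGetD (PySem.List.pyGetD co 0 []) d 0))
    (List.replicate p.toNat (0 : Int))
  (co, gap)

-- ===== PORT B =====
def analyze_overlap_by_vertex_pair_alt (cycles : List (List Int × Int)) (p : Int) : List (List Int) × List Int :=
  if p ≤ 0 then ([], []) else
  -- one residue tally (Python dict) per cycle, plus the set of residues seen at all
  let st := cycles.foldl (fun (st : List (PySem.Dict Int Int) × PySem.Set Int) c =>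
    let d := c.1.foldl (fun d v =>
      let r := PySem.Int.mod v p
      d.insert r (d.getD r 0 + 1)) PySem.Dict.empty
    (st.1 ++ [d], PySem.Set.update st.2 d.keys)) ([], PySem.Set.empty)
  let counts := st.1
  let touched := st.2
  let entry := fun (u v : Int) =>
    if u ≠ v then (counts.map (fun c => c.getD u 0 * c.getD v 0)).sum
    else (counts.map (fun c => c.getD u 0 * (c.getD u 0 - 1))).sum
  let co := (PySem.List.pyRange 0 p).map (fun u =>
    if PySem.Set.contains touched u then
      (PySem.List.pyRange 0 p).map (fun v => if PySem.Set.contains touched v then entry u v else 0)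
    else List.replicate p.toNat 0)
  let gap := (PySem.List.pyRange 0 p).map (fun d =>
    if d ≠ 0 then PySem.List.pyGetD (PySem.List.pyGetD co 0 []) d 0 else 0)
  (co, gap)

-- ===== PRECONDITION & SPEC =====
-- Pre_ excludes exactly the IndexError inputs: A indexes co_occur only while processing a cycle
-- with at least two vertices, and raises iff such a cycle holds a vertex outside [-p, p).
def Pre_analyze_overlap_by_vertex_pair (cycles : List (List Int × Int)) (p : Int) : Prop :=
  ∀ c ∈ cycles, c.1.length ≤ 1 ∨ ∀ v ∈ c.1, -p ≤ v ∧ v < p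
instance (cycles : List (List Int × Int)) (p : Int) : Decidable (Pre_analyze_overlap_by_vertex_pair cycles p) := by
  unfold Pre_analyze_overlap_by_vertex_pair; infer_instance

def pvWitness_analyze_overlap_by_vertex_pair : (List (List Int × Int)) × Int := ([([0, 2, -1], 5), ([1], 7)], 3)

def Spec_analyze_overlap_by_vertex_pair (cycles : List (List Int × Int)) (p : Int) (out : List (List Int) × List Int) : Prop := out = analyze_overlap_by_vertex_pair_alt cycles p
instance (cycles : List (List Int × Int)) (p : Int) (out : List (List Int) × List Int) : Decidable (Spec_analyze_overlap_by_vertex_pair cycles p out) := by unfold Spec_analyze_overlap_by_vertex_pair; infer_instance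

-- ===== CLAIM (what is proved, stated in full; the proofs are below) =====
def Claim_equal_analyze_overlap_by_vertex_pair : Prop := ∀ (cycles : List (List Int × Int)) (p : Int), Dom_analyze_overlap_by_vertex_pair cycles p → Pre_analyze_overlap_by_vertex_pair cycles p → Spec_analyze_overlap_by_vertex_pair cycles p (analyze_overlap_by_vertex_pair cycles p)

-- ===== LEMMAS AND PROOFS =====

def pvRi (p a : Int) : Int := PySem.Int.mod a p

lemma pvRi_eq (p a : Int) (hp : 0 < p) (h1 : -p ≤ a) (h2 : a < p) :
    pvRi p a = if a < 0 then a + p else a := by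
  unfold pvRi
  rw [PySem.Int.mod_eq_emod_of_pos hp]
  split
  · rename_i h
    have e : (a + p) % p = a % p := by exact Int.emod_eq_add_self_emod.symm
    rw [← e, Int.emod_eq_of_lt (by omega) (by omega)]
  · rename_i h
    exact Int.emod_eq_of_lt (by omega) h2

lemma pvRi_bounds (p a : Int) (hp : 0 < p) : 0 ≤ pvRi p a ∧ pvRi p a < p :=
  ⟨PySem.Int.mod_nonneg a hp, PySem.Int.mod_lt a hp⟩

lemma pvIdx_wrap (n : Nat) (p a : Int) (hp : 0 < p) (hn : (n : Int) = p)
    (h1 : -p ≤ a) (h2 : a < p) :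
    PySem.List.pyIdx? n a = some (pvRi p a).toNat := by
  rw [pvRi_eq p a hp h1 h2]
  unfold PySem.List.pyIdx?
  split
  · rename_i h
    rw [if_pos (by omega)]
    simp [show ¬ a < 0 by omega]
  · rename_i h
    rw [if_pos (by omega)]
    simp only [show a < 0 by omega, if_pos]
    congr 1
    omega

lemma pvGetD_wrap {α : Type} (xs : List α) (p a : Int) (d : α) (hp : 0 < p)
    (hlen : (xs.length : Int) = p) (h1 : -p ≤ a) (h2 : a < p) :
    PySem.List.pyGetD xs a d = xs.getD (pvRi p a).toNat d := by
  unfold PySem.List.pyGetD PySem.List.pyGet?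
  rw [pvIdx_wrap xs.length p a hp hlen h1 h2]
  simp [List.getD_eq_getElem?_getD]

lemma pvSetD_wrap {α : Type} (xs : List α) (p a : Int) (v : α) (hp : 0 < p)
    (hlen : (xs.length : Int) = p) (h1 : -p ≤ a) (h2 : a < p) :
    PySem.List.pySetD xs a v = xs.set (pvRi p a).toNat v := by
  unfold PySem.List.pySetD PySem.List.pySet?
  rw [pvIdx_wrap xs.length p a hp hlen h1 h2]
  simp

lemma pvSet_map_range {β : Type} (P m : Nat) (F : Nat → β) (v : β) (_hm : m < P) :
    ((List.range P).map F).set m v = (List.range P).map (fun k => if k = m then v else F k) := by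
  apply List.ext_getElem
  · simp
  · intro i hi1 hi2
    simp only [List.length_set, List.length_map, List.length_range] at hi1
    simp only [List.getElem_set, List.getElem_map, List.getElem_range]
    split_ifs with h1 h2 h2 <;> first | rfl | omega

def pvMk (P : Nat) (f : Int → Int → Int) : List (List Int) :=
  (List.range P).map (fun (r : Nat) => (List.range P).map (fun (s : Nat) => f (r : Int) (s : Int)))

lemma pvMk_congr (P : Nat) (f g : Int → Int → Int)
    (h : ∀ r s : Nat, r < P → s < P → f r s = g r s) : pvMk P f = pvMk P g := by
  unfold pvMk
  apply List.map_congr_left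
  intro r hr
  apply List.map_congr_left
  intro s hs
  exact h r s (List.mem_range.mp hr) (List.mem_range.mp hs)

lemma pvMk_getD (P : Nat) (f : Int → Int → Int) (k : Nat) (hk : k < P) (d : List Int) :
    (pvMk P f).getD k d = (List.range P).map (fun (s : Nat) => f (k : Int) (s : Int)) := by
  unfold pvMk
  rw [List.getD_eq_getElem?_getD]
  simp [hk]

lemma pvIncr_mk (P : Nat) (p : Int) (hp : p = (P : Int)) (hP : 0 < P) (f : Int → Int → Int)
    (a b : Int) (ha1 : -p ≤ a) (ha2 : a < p) (hb1 : -p ≤ b) (hb2 : b < p) :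
    pvIncr (pvMk P f) a b
      = pvMk P (fun r s => if r = pvRi p a ∧ s = pvRi p b then f r s + 1 else f r s) := by
  have hp0 : 0 < p := by omega
  have hka := pvRi_bounds p a hp0
  have hkb := pvRi_bounds p b hp0
  set ka := (pvRi p a).toNat with hkadef
  set kb := (pvRi p b).toNat with hkbdef
  have hkaP : ka < P := by omega
  have hkbP : kb < P := by omega
  have hcka : (ka : Int) = pvRi p a := by omega
  have hckb : (kb : Int) = pvRi p b := by omega
  have hlen : ((pvMk P f).length : Int) = p := by simp [pvMk, hp]
  have hrow : PySem.List.pyGetD (pvMk P f) a [] = (List.range P).map (fun (s : Nat) => f (ka : Int) (s : Int)) := by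
    rw [pvGetD_wrap _ p a [] hp0 hlen ha1 ha2, pvMk_getD P f ka hkaP, hcka]
  have hrowlen : (((List.range P).map (fun (s : Nat) => f (ka : Int) (s : Int))).length : Int) = p := by simp [hp]
  unfold pvIncr
  rw [hrow, pvSetD_wrap _ p b _ hp0 hrowlen hb1 hb2,
      pvGetD_wrap _ p b _ hp0 hrowlen hb1 hb2,
      pvSetD_wrap _ p a _ hp0 hlen ha1 ha2]
  rw [List.getD_eq_getElem?_getD]
  simp only [List.getElem?_map]
  rw [pvSet_map_range P kb _ _ hkbP]
  unfold pvMk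
  rw [pvSet_map_range P ka _ _ hkaP]
  apply List.map_congr_left
  intro r hr
  split_ifs with h1
  · subst h1
    apply List.map_congr_left
    intro s hs
    by_cases h2 : s = kb
    · subst h2
      have hget : (List.range P)[(pvRi p b).toNat]? = some kb :=
        List.getElem?_range (show (pvRi p b).toNat < P by omega)
      simp [hget, hcka, hckb]
    · beta_reduce
      rw [if_neg h2, if_neg (fun hc => h2 (by have := hc.2; omega))]
  · apply List.map_congr_left
    intro s hs
    beta_reduce
    rw [if_neg (fun hc => h1 (by have := hc.1; omega))]

def pvSpairs : List Int → List (Int × Int)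
  | [] => []
  | x :: t => t.flatMap (fun y => [(x, y), (y, x)]) ++ pvSpairs t
def pvStep (m : List (List Int)) (ab : Int × Int) : List (List Int) := pvIncr m ab.1 ab.2
def pvCnt (p : Int) (l : List Int) (r : Int) : Nat := (l.map (pvRi p)).count r
def pvContrib (p : Int) (l : List Int) (r s : Int) : Nat :=
  if r = s then pvCnt p l r * (pvCnt p l r - 1) else pvCnt p l r * pvCnt p l s
def pvSlot (p r s : Int) (ab : Int × Int) : Bool := decide (pvRi p ab.1 = r ∧ pvRi p ab.2 = s)

lemma pvFoldPairs (P : Nat) (p : Int) (hp : p = (P : Int)) (hP : 0 < P) :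
    ∀ (L : List (Int × Int)) (f : Int → Int → Int),
    (∀ ab ∈ L, (-p ≤ ab.1 ∧ ab.1 < p) ∧ (-p ≤ ab.2 ∧ ab.2 < p)) →
    L.foldl pvStep (pvMk P f)
      = pvMk P (fun r s => f r s + (L.countP (pvSlot p r s) : Int)) := by
  intro L
  induction L with
  | nil =>
    intro f _
    simp only [List.foldl_nil, List.countP_nil]
    exact pvMk_congr P _ _ (fun r s _ _ => by simp)
  | cons ab T ih =>
    intro f hL
    rw [List.foldl_cons]
    show (T.foldl pvStep (pvIncr (pvMk P f) ab.1 ab.2)) = _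
    obtain ⟨⟨ha1, ha2⟩, hb1, hb2⟩ := hL ab (List.mem_cons_self ..)
    rw [pvIncr_mk P p hp hP f ab.1 ab.2 ha1 ha2 hb1 hb2]
    rw [ih _ (fun x hx => hL x (List.mem_cons_of_mem _ hx))]
    apply pvMk_congr
    intro r s _ _
    simp only [List.countP_cons, pvSlot]
    by_cases hmatch : pvRi p ab.1 = (r : Int) ∧ pvRi p ab.2 = (s : Int)
    · rw [if_pos ⟨hmatch.1.symm, hmatch.2.symm⟩]
      simp [hmatch]
      ring
    · rw [if_neg (fun hc => hmatch ⟨hc.1.symm, hc.2.symm⟩)]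
      simp only [decide_eq_true_eq]
      rw [if_neg hmatch]
      simp

lemma pvFlat_range {α β : Type} (t : List α) (h : α → List β) (d : α) :
    (List.range t.length).flatMap (fun k => h (t.getD k d)) = t.flatMap h := by
  induction t with
  | nil => simp
  | cons x t ih =>
    rw [List.length_cons, List.range_succ_eq_map, List.flatMap_cons, List.flatMap_map]
    simp only [List.getD_cons_zero, List.getD_cons_succ]
    rw [List.flatMap_cons, ih]

lemma pvSpairs_mem (l : List Int) (ab : Int × Int) (h : ab ∈ pvSpairs l) :
    ab.1 ∈ l ∧ ab.2 ∈ l := by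
  induction l with
  | nil => simp [pvSpairs] at h
  | cons x t ih =>
    simp only [pvSpairs, List.mem_append, List.mem_flatMap] at h
    rcases h with ⟨y, hy, hab⟩ | h
    · simp only [List.mem_cons, List.not_mem_nil, or_false] at hab
      rcases hab with rfl | rfl
      · exact ⟨List.mem_cons_self .., List.mem_cons_of_mem _ hy⟩
      · exact ⟨List.mem_cons_of_mem _ hy, List.mem_cons_self ..⟩
    · obtain ⟨h1, h2⟩ := ih h
      exact ⟨List.mem_cons_of_mem _ h1, List.mem_cons_of_mem _ h2⟩

lemma pvWing_countP {β : Type} (q : β × β → Bool) (x : β) (t : List β) :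
    (t.flatMap (fun y => [(x, y), (y, x)])).countP q
      = t.countP (fun y => q (x, y)) + t.countP (fun y => q (y, x)) := by
  induction t with
  | nil => simp
  | cons y t ih =>
    simp only [List.flatMap_cons, List.countP_append, List.countP_cons, ih]
    simp
    split_ifs <;> simp_all <;> omega

lemma pvCnt_cons (p x r : Int) (t : List Int) :
    pvCnt p (x :: t) r = pvCnt p t r + (if pvRi p x = r then 1 else 0) := by
  simp only [pvCnt, List.map_cons, List.count_cons]
  split_ifs with h <;> simp_all

lemma pvCountP_resid (p s : Int) (t : List Int) :
    t.countP (fun y => decide (pvRi p y = s)) = pvCnt p t s := by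
  simp only [pvCnt, List.count_eq_countP, List.countP_map]
  apply List.countP_congr
  intro y _
  simp [beq_iff_eq]

lemma pvSpairs_countP (p r s : Int) : ∀ (l : List Int),
    (pvSpairs l).countP (pvSlot p r s) = pvContrib p l r s := by
  intro l
  induction l with
  | nil => simp [pvSpairs, pvContrib, pvCnt]
  | cons x t ih =>
    simp only [pvSpairs, List.countP_append, ih, pvWing_countP]
    have e1 : t.countP (fun y => pvSlot p r s (x, y))
        = if pvRi p x = r then pvCnt p t s else 0 := by
      by_cases hx : pvRi p x = r
      · rw [if_pos hx, ← pvCountP_resid p s t]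
        apply List.countP_congr
        intro y _
        simp [pvSlot, hx]
      · rw [if_neg hx]
        rw [List.countP_eq_zero]
        intro y _
        simp [pvSlot, hx]
    have e2 : t.countP (fun y => pvSlot p r s (y, x))
        = if pvRi p x = s then pvCnt p t r else 0 := by
      by_cases hx : pvRi p x = s
      · rw [if_pos hx, ← pvCountP_resid p r t]
        apply List.countP_congr
        intro y _
        simp [pvSlot, hx]
      · rw [if_neg hx]
        rw [List.countP_eq_zero]
        intro y _
        simp [pvSlot, hx]
    rw [e1, e2]
    simp only [pvContrib, pvCnt_cons]
    by_cases hxr : pvRi p x = r <;> by_cases hxs : pvRi p x = s <;> by_cases hrs : r = s <;>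
      simp only [hxr, hxs, hrs, if_pos, if_false] <;>
      first
      | (exfalso; rw [hrs] at hxr; exact hxs hxr)
      | (cases hc : pvCnt p t r <;> cases hc2 : pvCnt p t s <;> simp_all <;> ring_nf)

lemma pvContrib_short (p r s : Int) (l : List Int) (h : l.length ≤ 1) :
    pvContrib p l r s = 0 := by
  match l, h with
  | [], _ => simp [pvContrib, pvCnt]
  | [v], _ =>
    simp only [pvContrib, pvCnt, List.map_cons, List.map_nil, List.count_cons, List.count_nil,
      Nat.zero_add]
    by_cases hrs : r = s
    · rw [if_pos hrs]
      split_ifs <;> simp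
    · rw [if_neg hrs]
      by_cases h1 : pvRi p v == r <;> by_cases h2 : pvRi p v == s <;> simp_all

lemma pvNat_eq_spairs : ∀ (verts : List Int),
    (List.range verts.length).flatMap (fun i =>
      (List.range (verts.length - (i + 1))).flatMap (fun k =>
        [(verts.getD i 0, verts.getD (i + 1 + k) 0), (verts.getD (i + 1 + k) 0, verts.getD i 0)]))
    = pvSpairs verts := by
  intro verts
  induction verts with
  | nil => simp [pvSpairs]
  | cons x t ih =>
    rw [List.length_cons, List.range_succ_eq_map, List.flatMap_cons, List.flatMap_map]
    simp only [List.getD_cons_zero, List.getD_cons_succ,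
      Nat.succ_sub_succ, Nat.zero_add]
    unfold pvSpairs
    congr 1
    · -- head chunk: range over t with getD = flatMap over t
      rw [← pvFlat_range t (fun y => [(x, y), (y, x)]) 0]
      apply List.flatMap_congr
      intro k hk
      rw [Nat.add_comm 1 k]
      simp
    · rw [← ih]
      apply List.flatMap_congr
      intro i hi
      apply List.flatMap_congr
      intro k hk
      have e : i.succ + 1 + k = (i + 1 + k) + 1 := by omega
      rw [e]
      simp

lemma pvIdx_eq_spairs (verts : List Int) :
    (PySem.List.pyRange 0 (PySem.List.len verts)).flatMap (fun i =>
      (PySem.List.pyRange (i + 1) (PySem.List.len verts)).flatMap (fun j =>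
        [(PySem.List.pyGetD verts i 0, PySem.List.pyGetD verts j 0),
         (PySem.List.pyGetD verts j 0, PySem.List.pyGetD verts i 0)]))
    = pvSpairs verts := by
  rw [← pvNat_eq_spairs verts]
  rw [PySem.List.len_eq, PySem.List.pyRange_zero_nat, List.flatMap_map]
  apply List.flatMap_congr
  intro i hi
  rw [show ((i : Int) + 1) = ((i + 1 : Nat) : Int) by push_cast; ring,
      PySem.List.pyRange_one, List.flatMap_map]
  rw [show ((verts.length : Int) - ((i + 1 : Nat) : Int)).toNat = verts.length - (i + 1) by omega]
  apply List.flatMap_congr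
  intro k hk
  rw [show ((i + 1 : Nat) : Int) + (k : Int) = ((i + 1 + k : Nat) : Int) by push_cast; ring]
  simp only [PySem.List.pyGetD, PySem.List.pyGet?_natCast]
  rw [List.getD_eq_getElem?_getD, List.getD_eq_getElem?_getD]

lemma pvCycle_loop (verts : List Int) (m : List (List Int)) :
    (PySem.List.pyRange 0 (PySem.List.len verts)).foldl (fun co i =>
      (PySem.List.pyRange (i + 1) (PySem.List.len verts)).foldl (fun co j =>
        pvIncr (pvIncr co (PySem.List.pyGetD verts i 0) (PySem.List.pyGetD verts j 0))
          (PySem.List.pyGetD verts j 0) (PySem.List.pyGetD verts i 0)) co) m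
    = (pvSpairs verts).foldl pvStep m := by
  rw [← pvIdx_eq_spairs verts, List.foldl_flatMap]
  apply PySem.List.foldl_congr_mem
  intro acc i _
  rw [List.foldl_flatMap]
  apply PySem.List.foldl_congr_mem
  intro acc2 j _
  simp [List.foldl, pvStep]

lemma pvShortCycleNoop (verts : List Int) (m : List (List Int)) (h : verts.length ≤ 1) :
    (pvSpairs verts).foldl pvStep m = m := by
  match verts, h with
  | [], _ => rfl
  | [v], _ => rfl

lemma pvCycle (P : Nat) (p : Int) (hp : p = (P : Int)) (hP : 0 < P) (f : Int → Int → Int)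
    (verts : List Int) (hpre : verts.length ≤ 1 ∨ ∀ v ∈ verts, -p ≤ v ∧ v < p) :
    (pvSpairs verts).foldl pvStep (pvMk P f)
      = pvMk P (fun r s => f r s + (pvContrib p verts r s : Int)) := by
  rcases hpre with hshort | hin
  · rw [pvShortCycleNoop verts _ hshort]
    apply pvMk_congr
    intro r s _ _
    rw [pvContrib_short p _ _ _ hshort]
    simp
  · rw [pvFoldPairs P p hp hP _ f (fun ab hab => by
      obtain ⟨h1, h2⟩ := pvSpairs_mem verts ab hab
      exact ⟨hin _ h1, hin _ h2⟩)]
    apply pvMk_congr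
    intro r s _ _
    rw [pvSpairs_countP]

lemma pvCyclesFold (P : Nat) (p : Int) (hp : p = (P : Int)) (hP : 0 < P) :
    ∀ (cs : List (List Int × Int)) (f : Int → Int → Int),
    (∀ c ∈ cs, c.1.length ≤ 1 ∨ ∀ v ∈ c.1, -p ≤ v ∧ v < p) →
    cs.foldl (fun co c => (pvSpairs c.1).foldl pvStep co) (pvMk P f)
      = pvMk P (fun r s => f r s + (cs.map (fun c => (pvContrib p c.1 r s : Int))).sum) := by
  intro cs
  induction cs with
  | nil =>
    intro f _
    simp only [List.foldl_nil, List.map_nil, List.sum_nil]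
    exact pvMk_congr P _ _ (fun r s _ _ => by simp)
  | cons c T ih =>
    intro f hpre
    rw [List.foldl_cons, pvCycle P p hp hP f c.1 (hpre c (List.mem_cons_self ..)),
        ih _ (fun x hx => hpre x (List.mem_cons_of_mem _ hx))]
    apply pvMk_congr
    intro r s _ _
    simp only [List.map_cons, List.sum_cons]
    ring

lemma pvCastDiag (a : Nat) : ((a * (a - 1) : Nat) : Int) = (a : Int) * ((a : Int) - 1) := by
  cases a with
  | zero => simp
  | succ n => push_cast [Nat.succ_sub_one]; ring

lemma pvGapFold (P : Nat) (h : Int → Int) : ∀ (m : Nat), m ≤ P →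
    (PySem.List.pyRange 1 (m : Int)).foldl (fun g d => PySem.List.pySetD g d (h d))
      (List.replicate P (0 : Int))
    = (List.range P).map (fun k => if 0 < k ∧ k < m then h (k : Int) else 0) := by
  intro m
  induction m with
  | zero =>
    intro _
    rw [show ((0:Nat):Int) = 0 by norm_num, PySem.List.pyRange_one_eq_nil (by norm_num)]
    simp only [List.foldl_nil]
    rw [List.map_congr_left (g := fun _ => (0:Int)) (fun k _ => by
      rw [if_neg (by omega)])]
    rw [List.map_const', List.length_range]
  | succ m ihm =>
    intro hm1
    rcases Nat.eq_zero_or_pos m with rfl | hmpos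
    · rw [show ((0+1:Nat):Int) = 1 by norm_num, PySem.List.pyRange_one_eq_nil (by norm_num)]
      simp only [List.foldl_nil]
      rw [List.map_congr_left (g := fun _ => (0:Int)) (fun k _ => by
        rw [if_neg (by omega)])]
      rw [List.map_const', List.length_range]
    · have hcast : ((m + 1 : Nat) : Int) = (m : Int) + 1 := by push_cast; ring
      rw [hcast, PySem.List.pyRange_one_succ_right (by exact_mod_cast hmpos),
          List.foldl_append, ihm (by omega)]
      simp only [List.foldl_cons, List.foldl_nil]
      rw [PySem.List.pySetD_natCast, pvSet_map_range P m _ _ (by omega)]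
      apply List.map_congr_left
      intro k hk
      have hkP := List.mem_range.mp hk
      by_cases hkm : k = m
      · subst hkm
        rw [if_pos rfl, if_pos ⟨hmpos, by omega⟩]
      · rw [if_neg hkm]
        by_cases hc : 0 < k ∧ k < m
        · rw [if_pos hc, if_pos ⟨hc.1, by omega⟩]
        · rw [if_neg hc, if_neg (by omega)]

lemma pvRepl (P : Nat) : List.replicate P (0:Int) = (List.range P).map (fun (_ : Nat) => (0:Int)) := by
  rw [List.map_const', List.length_range]

lemma pvDictCnt (p : Int) (l : List Int) (u : Int) :
    (l.foldl (fun d v => d.insert (PySem.Int.mod v p) (d.getD (PySem.Int.mod v p) 0 + 1))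
      (PySem.Dict.empty : PySem.Dict Int Int)).getD u 0
    = (pvCnt p l u : Int) := by
  show (l.foldl (fun (d : PySem.Dict Int Int) v =>
    d.insert (pvRi p v) (d.getD (pvRi p v) 0 + 1)) PySem.Dict.empty).getD u 0 = _
  rw [← List.foldl_map (f := pvRi p)
    (g := fun (d : PySem.Dict Int Int) x => d.insert x (d.getD x 0 + 1))]
  rw [PySem.Dict.getD_foldl_insert_add_one]
  simp [pvCnt]

lemma pvContrib_zero_left (p r s : Int) (l : List Int) (h : pvCnt p l r = 0) :
    pvContrib p l r s = 0 := by
  unfold pvContrib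
  split_ifs
  · rw [h]
  · rw [h]
    simp

lemma pvContrib_zero_right (p r s : Int) (l : List Int) (h : pvCnt p l s = 0) :
    pvContrib p l r s = 0 := by
  unfold pvContrib
  split_ifs with hrs
  · rw [hrs, h]
  · rw [h]
    simp

lemma pvKeys_mem (p u : Int) (l : List Int) :
    (u ∈ (l.foldl (fun d v => d.insert (PySem.Int.mod v p) (d.getD (PySem.Int.mod v p) 0 + 1))
      (PySem.Dict.empty : PySem.Dict Int Int)).keys)
    ↔ 0 < pvCnt p l u := by
  show u ∈ (l.foldl (fun (d : PySem.Dict Int Int) v =>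
    d.insert (pvRi p v) (d.getD (pvRi p v) 0 + 1)) PySem.Dict.empty).keys ↔ _
  rw [PySem.Dict.keys_foldl_insert_key l (pvRi p) _ PySem.Dict.empty, PySem.Dict.keys_empty,
      PySem.Set.update_nil_left, PySem.Set.mem_ofList]
  simp [pvCnt, List.count_pos_iff]

lemma pvTouched (p : Int) : ∀ (cs : List (List Int × Int)) (t : PySem.Set Int) (u : Int),
    u ∈ cs.foldl (fun t c => PySem.Set.update t (c.1.foldl (fun d v =>
      d.insert (PySem.Int.mod v p) (d.getD (PySem.Int.mod v p) 0 + 1))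
      (PySem.Dict.empty : PySem.Dict Int Int)).keys) t
    ↔ u ∈ t ∨ ∃ c ∈ cs, 0 < pvCnt p c.1 u := by
  intro cs
  induction cs with
  | nil => intro t u; simp
  | cons c T ih =>
    intro t u
    rw [List.foldl_cons, ih, PySem.Set.mem_update, pvKeys_mem]
    constructor
    · rintro ((h | h) | h)
      · exact Or.inl h
      · exact Or.inr ⟨c, List.mem_cons_self .., h⟩
      · obtain ⟨c', hc', hcnt⟩ := h
        exact Or.inr ⟨c', List.mem_cons_of_mem _ hc', hcnt⟩
    · rintro (h | ⟨c', hc', hcnt⟩)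
      · exact Or.inl (Or.inl h)
      · rcases List.mem_cons.mp hc' with rfl | hm
        · exact Or.inl (Or.inr hcnt)
        · exact Or.inr ⟨c', hm, hcnt⟩

theorem pvMain (cycles : List (List Int × Int)) (p : Int)
    (hpre : ∀ c ∈ cycles, c.1.length ≤ 1 ∨ ∀ v ∈ c.1, -p ≤ v ∧ v < p) :
    analyze_overlap_by_vertex_pair cycles p = analyze_overlap_by_vertex_pair_alt cycles p := by
  by_cases hple : p ≤ 0
  · -- both sides are ([], [])
    have hshort : ∀ c ∈ cycles, c.1.length ≤ 1 := by
      intro c hc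
      rcases hpre c hc with h | h
      · exact h
      · match hv : c.1 with
        | [] => simp
        | v :: t => exact absurd (h v (hv ▸ List.mem_cons_self ..)) (by omega)
    simp only [analyze_overlap_by_vertex_pair, analyze_overlap_by_vertex_pair_alt, if_pos hple]
    rw [PySem.List.pyRange_one_eq_nil hple, PySem.List.pyRange_one_eq_nil (by omega : p ≤ 1)]
    simp only [List.map_nil, List.foldl_nil]
    rw [show p.toNat = 0 by omega, List.replicate_zero]
    have hco : List.foldl
        (fun (co : List (List Int)) (c : List Int × Int) =>
          List.foldl
            (fun co i =>
              List.foldl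
                (fun co j =>
                  pvIncr (pvIncr co (PySem.List.pyGetD c.1 i 0) (PySem.List.pyGetD c.1 j 0))
                    (PySem.List.pyGetD c.1 j 0) (PySem.List.pyGetD c.1 i 0))
                co (PySem.List.pyRange (i + 1) (PySem.List.len c.1)))
            co (PySem.List.pyRange 0 (PySem.List.len c.1)))
        [] cycles = [] := by
      exact (PySem.List.foldl_congr_mem cycles _ (fun acc _ => acc) [] (fun acc c hc => by
        rw [pvCycle_loop c.1 acc]
        exact pvShortCycleNoop c.1 acc (hshort c hc))).trans (PySem.List.foldl_ignore cycles [])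
    rw [hco]
  · rw [not_le] at hple
    obtain ⟨P, rfl⟩ : ∃ P : Nat, p = (P : Int) := ⟨p.toNat, by omega⟩
    have hP : 0 < P := by exact_mod_cast hple
    simp only [analyze_overlap_by_vertex_pair, analyze_overlap_by_vertex_pair_alt,
      if_neg (by omega : ¬ ((P : Int) ≤ 0))]
    have htoNat : ((P : Int)).toNat = P := by omega
    rw [htoNat]
    -- initial matrix is pvMk P 0
    have hco0 : ((PySem.List.pyRange 0 (P : Int)).map
        (fun _ => List.replicate P (0 : Int))) = pvMk P (fun _ _ => 0) := by
      rw [PySem.List.pyRange_zero_nat, List.map_map]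
      unfold pvMk
      apply List.map_congr_left
      intro k _
      exact pvRepl P
    rw [hco0]
    -- A's cycle loop
    have hcoA : List.foldl
        (fun (co : List (List Int)) (c : List Int × Int) =>
          List.foldl
            (fun co i =>
              List.foldl
                (fun co j =>
                  pvIncr (pvIncr co (PySem.List.pyGetD c.1 i 0) (PySem.List.pyGetD c.1 j 0))
                    (PySem.List.pyGetD c.1 j 0) (PySem.List.pyGetD c.1 i 0))
                co (PySem.List.pyRange (i + 1) (PySem.List.len c.1)))
            co (PySem.List.pyRange 0 (PySem.List.len c.1)))
        (pvMk P (fun _ _ => 0)) cycles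
        = pvMk P (fun r s =>
            (cycles.map (fun c => (pvContrib (P : Int) c.1 r s : Int))).sum) := by
      refine (PySem.List.foldl_congr_mem cycles _
        (fun co c => (pvSpairs c.1).foldl pvStep co) (pvMk P (fun _ _ => 0))
        (fun acc c _ => pvCycle_loop c.1 acc)).trans ?_
      refine (pvCyclesFold P (P : Int) rfl hP cycles _ hpre).trans ?_
      exact pvMk_congr P _ _ (fun r s _ _ => by simp)
    rw [hcoA]
    -- split B's single pass into the counts list and the touched set
    rw [PySem.List.foldl_prod_mk
      (f := fun (acc : List (PySem.Dict Int Int)) (c : List Int × Int) =>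
        acc ++ [List.foldl (fun (d : PySem.Dict Int Int) (v : Int) =>
            d.insert (PySem.Int.mod v (P : Int)) (d.getD (PySem.Int.mod v (P : Int)) 0 + 1))
            (PySem.Dict.empty : PySem.Dict Int Int) c.1])
      (g := fun (t : PySem.Set Int) (c : List Int × Int) =>
        PySem.Set.update t (List.foldl (fun (d : PySem.Dict Int Int) (v : Int) =>
            d.insert (PySem.Int.mod v (P : Int)) (d.getD (PySem.Int.mod v (P : Int)) 0 + 1))
            (PySem.Dict.empty : PySem.Dict Int Int) c.1).keys)]
    -- B's counts list is one tally per cycle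
    have hcounts : List.foldl
        (fun (acc : List (PySem.Dict Int Int)) (c : List Int × Int) =>
          acc ++ [List.foldl (fun (d : PySem.Dict Int Int) (v : Int) =>
            d.insert (PySem.Int.mod v (P : Int)) (d.getD (PySem.Int.mod v (P : Int)) 0 + 1))
            (PySem.Dict.empty : PySem.Dict Int Int) c.1]) [] cycles
        = (cycles.map (fun c => List.foldl (fun (d : PySem.Dict Int Int) (v : Int) =>
            d.insert (PySem.Int.mod v (P : Int)) (d.getD (PySem.Int.mod v (P : Int)) 0 + 1))
            (PySem.Dict.empty : PySem.Dict Int Int) c.1)) := by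
      rw [PySem.List.foldl_append_singleton_eq_map]
      rfl
    rw [hcounts]
    -- membership in the touched set is "some cycle hits the residue"
    have hT : ∀ u : Int, (PySem.Set.contains (List.foldl (fun t c => PySem.Set.update t (List.foldl (fun (d : PySem.Dict Int Int) (v : Int) =>
          d.insert (PySem.Int.mod v (P : Int)) (d.getD (PySem.Int.mod v (P : Int)) 0 + 1))
          (PySem.Dict.empty : PySem.Dict Int Int) c.1).keys) PySem.Set.empty cycles) u = true)
        ↔ ∃ c ∈ cycles, 0 < pvCnt (P : Int) c.1 u := by
      intro u
      rw [PySem.Set.contains_iff, pvTouched (P : Int) cycles PySem.Set.empty u]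
      simp [PySem.Set.empty]
    -- B's co is pvMk of the product formula
    have hcoB : ((PySem.List.pyRange 0 (P : Int)).map (fun u =>
        if PySem.Set.contains (List.foldl (fun t c => PySem.Set.update t (List.foldl (fun (d : PySem.Dict Int Int) (v : Int) =>
          d.insert (PySem.Int.mod v (P : Int)) (d.getD (PySem.Int.mod v (P : Int)) 0 + 1))
          (PySem.Dict.empty : PySem.Dict Int Int) c.1).keys) PySem.Set.empty cycles) u then
          (PySem.List.pyRange 0 (P : Int)).map (fun v =>
            if PySem.Set.contains (List.foldl (fun t c => PySem.Set.update t (List.foldl (fun (d : PySem.Dict Int Int) (v : Int) =>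
          d.insert (PySem.Int.mod v (P : Int)) (d.getD (PySem.Int.mod v (P : Int)) 0 + 1))
          (PySem.Dict.empty : PySem.Dict Int Int) c.1).keys) PySem.Set.empty cycles) v then
              (if u ≠ v then ((cycles.map (fun c => List.foldl (fun (d : PySem.Dict Int Int) (v : Int) =>
            d.insert (PySem.Int.mod v (P : Int)) (d.getD (PySem.Int.mod v (P : Int)) 0 + 1))
            (PySem.Dict.empty : PySem.Dict Int Int) c.1)).map (fun c => c.getD u 0 * c.getD v 0)).sum
               else ((cycles.map (fun c => List.foldl (fun (d : PySem.Dict Int Int) (v : Int) =>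
            d.insert (PySem.Int.mod v (P : Int)) (d.getD (PySem.Int.mod v (P : Int)) 0 + 1))
            (PySem.Dict.empty : PySem.Dict Int Int) c.1)).map (fun c => c.getD u 0 * (c.getD u 0 - 1))).sum)
            else 0)
        else List.replicate P 0))
        = pvMk P (fun r s =>
            (cycles.map (fun c => (pvContrib (P : Int) c.1 r s : Int))).sum) := by
      rw [PySem.List.pyRange_zero_nat, List.map_map]
      unfold pvMk
      apply List.map_congr_left
      intro r _
      simp only [Function.comp]
      by_cases hu : PySem.Set.contains (List.foldl (fun t c => PySem.Set.update t (List.foldl (fun (d : PySem.Dict Int Int) (v : Int) =>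
          d.insert (PySem.Int.mod v (P : Int)) (d.getD (PySem.Int.mod v (P : Int)) 0 + 1))
          (PySem.Dict.empty : PySem.Dict Int Int) c.1).keys) PySem.Set.empty cycles) ((r : Nat) : Int) = true
      · rw [if_pos hu, List.map_map]
        apply List.map_congr_left
        intro k _
        simp only [Function.comp, List.map_map]
        by_cases hv : PySem.Set.contains (List.foldl (fun t c => PySem.Set.update t (List.foldl (fun (d : PySem.Dict Int Int) (v : Int) =>
          d.insert (PySem.Int.mod v (P : Int)) (d.getD (PySem.Int.mod v (P : Int)) 0 + 1))
          (PySem.Dict.empty : PySem.Dict Int Int) c.1).keys) PySem.Set.empty cycles) ((k : Nat) : Int) = true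
        · rw [if_pos hv]
          by_cases hrs : (r : Int) = (k : Int)
          · rw [if_neg (by simpa using hrs), hrs]
            apply congrArg List.sum
            apply List.map_congr_left
            intro c _
            simp only [Function.comp]
            rw [pvDictCnt, pvContrib, if_pos rfl, pvCastDiag]
          · rw [if_pos (by simpa using hrs)]
            apply congrArg List.sum
            apply List.map_congr_left
            intro c _
            simp only [Function.comp]
            rw [pvDictCnt, pvDictCnt, pvContrib, if_neg hrs]
            push_cast
            ring
        · have hz : ∀ c ∈ cycles, pvCnt (P : Int) c.1 ((k : Nat) : Int) = 0 := by
            intro c hc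
            by_contra hnz
            exact hv ((hT _).mpr ⟨c, hc, by omega⟩)
          rw [if_neg hv]
          symm
          rw [List.map_congr_left (g := fun _ => (0 : Int)) (fun c hc => by
            rw [pvContrib_zero_right _ _ _ _ (hz c hc)]
            simp)]
          simp
      · have hz : ∀ c ∈ cycles, pvCnt (P : Int) c.1 ((r : Nat) : Int) = 0 := by
          intro c hc
          by_contra hnz
          exact hu ((hT _).mpr ⟨c, hc, by omega⟩)
        rw [if_neg hu, pvRepl P]
        apply List.map_congr_left
        intro k _
        symm
        rw [List.map_congr_left (g := fun _ => (0 : Int)) (fun c hc => by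
          rw [pvContrib_zero_left _ _ _ _ (hz c hc)]
          simp)]
        simp
    rw [hcoB]
    -- gap components
    have hgap : List.foldl (fun g d => PySem.List.pySetD g d
          (PySem.List.pyGetD (PySem.List.pyGetD (pvMk P (fun r s =>
            (cycles.map (fun c => (pvContrib (P : Int) c.1 r s : Int))).sum)) 0 []) d 0))
          (List.replicate P (0 : Int)) (PySem.List.pyRange 1 (P : Int))
        = (PySem.List.pyRange 0 (P : Int)).map (fun d => if d ≠ 0 then
            PySem.List.pyGetD (PySem.List.pyGetD (pvMk P (fun r s =>
              (cycles.map (fun c => (pvContrib (P : Int) c.1 r s : Int))).sum)) 0 []) d 0 else 0) := by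
      rw [pvGapFold P _ P le_rfl, PySem.List.pyRange_zero_nat, List.map_map]
      apply List.map_congr_left
      intro k hk
      have hkP := List.mem_range.mp hk
      simp only [Function.comp]
      by_cases hk0 : k = 0
      · subst hk0
        rw [if_neg (by omega), if_neg (by simp)]
      · rw [if_pos ⟨by omega, hkP⟩, if_pos (by exact_mod_cast hk0)]
    rw [hgap]


-- ===== VERDICT (by name: the statement is the Claim_ definition above) =====
theorem analyze_overlap_by_vertex_pair_spec : Claim_equal_analyze_overlap_by_vertex_pair := by
  intro cycles p _ hpre
  unfold Spec_analyze_overlap_by_vertex_pair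
  exact pvMain cycles p hpre
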